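-- pv_equiv track=rewrite | github.com/tonymajestro/AdventOfCode2023 | 4/part1.py | solve
-- ===== SOURCE A (Python) =====
-- def solve(lines):
--     total = 0
--     for line in lines:
--         parts = line.split('|')
--         winners = set(parts[0].split()[2:])
--         numbers = set(parts[1].split())
--
--         num_matches = len(winners.intersection(numbers))
--         if num_matches > 0:
--             total += 2 ** (num_matches - 1)
--
--     return total
-- ===== SOURCE B (Python) =====
-- def solve(lines):
--     total = 0
--     for line in lines:
--         parts = line.split('|')
--         winners = set(parts[0].split()[2:])
--         pts = 0
--         seen = set()
--         for num in parts[1].split():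
--             if num in winners and num not in seen:
--                 seen.add(num)
--                 pts = 1 if pts == 0 else pts * 2
--         total += pts
--     return total
-- ===== Notes on version B (the rewrite author's own statement) =====
-- stated objective: alternative
-- what changed: Replaces building the played-numbers set, intersecting it with the winners set and scoring by the closed form 2**(num_matches-1) with a single pass over the played numbers that doubles a per-card points accumulator (1 on the first distinct match, *2 on each further one), so no intersection set and no exponentiation are computed.
import Mathlib
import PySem

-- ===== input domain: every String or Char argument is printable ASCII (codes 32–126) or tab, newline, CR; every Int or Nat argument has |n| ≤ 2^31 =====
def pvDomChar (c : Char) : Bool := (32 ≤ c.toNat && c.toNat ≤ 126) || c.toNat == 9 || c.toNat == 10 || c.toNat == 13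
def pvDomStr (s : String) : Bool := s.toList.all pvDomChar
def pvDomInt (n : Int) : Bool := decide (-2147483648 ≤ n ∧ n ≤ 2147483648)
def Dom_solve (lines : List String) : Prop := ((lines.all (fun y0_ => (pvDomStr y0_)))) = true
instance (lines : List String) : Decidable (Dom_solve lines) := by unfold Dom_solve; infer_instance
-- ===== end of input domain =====

-- B replaces the intersection-size-then-2**(num_matches-1) scoring by a per-card doubling accumulator
-- over the played numbers; same parsing, same total (objective: alternative decomposition, not speed).

-- ===== PORT A =====
-- line.split('|'); the separator "|" is a nonempty literal, so split? is always some
def pvParts (line : String) : List String := (PySem.Str.split? line "|").getD []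

-- set(parts[0].split()[2:])
def pvWinners (parts : List String) : PySem.Set String :=
  PySem.Set.ofList (PySem.List.slice (PySem.Str.split₀ (PySem.List.pyGetD parts 0 "")) (some 2) none)

-- A's loop body: one card of the for-loop
def pvLineA (total : Int) (line : String) : Int :=
  let parts := pvParts line
  let winners := pvWinners parts
  let numbers : PySem.Set String := PySem.Set.ofList (PySem.Str.split₀ (PySem.List.pyGetD parts 1 ""))
  let numMatches : Int := PySem.Set.len (PySem.Set.inter winners numbers)
  if numMatches > 0 then total + 2 ^ (numMatches - 1).toNat else total

def solve (lines : List String) : Int := lines.foldl pvLineA 0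

-- ===== PORT B =====
-- B's inner loop body: one played number (state = (pts, seen))
def pvStep (winners : PySem.Set String) (st : Int × PySem.Set String) (num : String) : Int × PySem.Set String :=
  if winners.contains num && !(st.2.contains num) then
    (if st.1 == 0 then 1 else st.1 * 2, st.2.add num)
  else st

-- B's loop body: one card of the for-loop
def pvLineB (total : Int) (line : String) : Int :=
  let parts := pvParts line
  let winners := pvWinners parts
  let st := (PySem.Str.split₀ (PySem.List.pyGetD parts 1 "")).foldl (pvStep winners) (0, PySem.Set.empty)
  total + st.1

def solve_alt (lines : List String) : Int := lines.foldl pvLineB 0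

-- ===== PRECONDITION & SPEC =====
-- Pre_ excludes exactly the lines without '|', on which both Pythons raise IndexError at parts[1].
def Pre_solve (lines : List String) : Prop := (lines.all (fun l => PySem.Str.isIn "|" l)) = true
instance (lines : List String) : Decidable (Pre_solve lines) := by unfold Pre_solve; infer_instance
def pvWitness_solve : List String := ["Card 1: 1 2 3 | 2 3 9", "Card 2: 5 | 6 7"]

def Spec_solve (lines : List String) (out : Int) : Prop := out = solve_alt lines
instance (lines : List String) (out : Int) : Decidable (Spec_solve lines out) := by unfold Spec_solve; infer_instance

-- ===== CLAIM (what is proved, stated in full; the proofs are below) =====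
def Claim_equal_solve : Prop := ∀ (lines : List String), Dom_solve lines → Pre_solve lines → Spec_solve lines (solve lines)

-- ===== LEMMAS AND PROOFS =====

-- number of fresh hits B registers while scanning nums starting from seen
def pvHits (winners : PySem.Set String) : List String → PySem.Set String → Nat
  | [], _ => 0
  | n :: ns, seen =>
      if winners.contains n && !(seen.contains n) then
        1 + pvHits winners ns (seen.add n)
      else pvHits winners ns seen

-- doubling applied k times
def pvDbl (p : Int) : Nat → Int
  | 0 => p
  | k + 1 => pvDbl (if p == 0 then 1 else p * 2) k

theorem pvContains_add (s : PySem.Set String) (n x : String) :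
    (PySem.Set.add s n).contains x = (s.contains x || x == n) := by
  simp only [PySem.Set.add, PySem.Set.contains]
  split_ifs with h
  · by_cases hx : x = n
    · subst hx; simp at h ⊢; exact h
    · simp [hx]
  · by_cases hx : x = n <;> simp [hx]

theorem pvDbl_one_add (p : Int) (k : Nat) :
    pvDbl p (1 + k) = pvDbl (if p == 0 then 1 else p * 2) k := by
  rw [Nat.add_comm]
  simp [pvDbl]

theorem pvFold_fst (winners : PySem.Set String) (nums : List String) (pts : Int) (seen : PySem.Set String) :
    (nums.foldl (pvStep winners) (pts, seen)).1 = pvDbl pts (pvHits winners nums seen) := by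
  induction nums generalizing pts seen with
  | nil => rfl
  | cons n ns ih =>
      simp only [List.foldl, pvStep, pvHits]
      by_cases h : (winners.contains n && !(PySem.Set.contains seen n)) = true
      · rw [if_pos h, if_pos h, pvDbl_one_add, ih]
      · rw [if_neg h, if_neg h]
        exact ih pts seen

theorem pvHits_card (winners : PySem.Set String) (nums : List String) (seen : PySem.Set String) :
    (pvHits winners nums seen : Nat)
      = ((nums.filter (fun x => winners.contains x && !(seen.contains x))).toFinset).card := by
  induction nums generalizing seen with
  | nil => simp [pvHits]
  | cons n ns ih =>
      simp only [pvHits]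
      by_cases h : (winners.contains n && !(seen.contains n)) = true
      · rw [if_pos h]
        have hfe : (ns.filter (fun x => winners.contains x && !((seen.add n).contains x))).toFinset
            = ((ns.filter (fun x => winners.contains x && !(seen.contains x))).toFinset).erase n := by
          ext x
          simp only [List.mem_toFinset, List.mem_filter, Finset.mem_erase, pvContains_add]
          constructor
          · rintro ⟨hx, hp⟩
            rw [Bool.and_eq_true] at hp
            obtain ⟨hw, hns⟩ := hp
            simp only [Bool.not_eq_true', Bool.or_eq_false_iff] at hns
            refine ⟨by simpa using hns.2, hx, ?_⟩
            have h1 : x ∈ winners := (PySem.Set.contains_iff _ _).mp hw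
            have h2 : x ∉ seen := fun hm => by
              rw [(PySem.Set.contains_iff _ _).mpr hm] at hns
              exact absurd hns.1 (by simp)
            simp [PySem.Set.contains, h1, h2]
          · rintro ⟨hne, hx, hp⟩
            rw [Bool.and_eq_true] at hp
            obtain ⟨hw, hns⟩ := hp
            simp only [Bool.not_eq_true'] at hns
            refine ⟨hx, ?_⟩
            have h1 : x ∈ winners := (PySem.Set.contains_iff _ _).mp hw
            have h2 : x ∉ seen := fun hm => by
              rw [(PySem.Set.contains_iff _ _).mpr hm] at hns
              exact absurd hns (by simp)
            simp [PySem.Set.contains, h1, h2, hne]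
        rw [ih, hfe]
        simp only [List.filter_cons, h, if_pos, List.toFinset_cons]
        set T := (ns.filter (fun x => winners.contains x && !(seen.contains x))).toFinset with hT
        clear_value T
        by_cases hnT : n ∈ T
        · rw [Finset.insert_eq_self.mpr hnT]
          have h2 : 1 ≤ T.card := Finset.card_pos.mpr ⟨n, hnT⟩
          rw [Finset.card_erase_of_mem hnT]
          exact Nat.add_sub_cancel' h2
        · rw [Finset.card_insert_of_notMem hnT, Finset.erase_eq_of_notMem hnT]
          exact Nat.add_comm 1 T.card
      · rw [if_neg h]
        have h' : (winners.contains n && !(seen.contains n)) = false := by simpa using h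
        simp only [List.filter_cons, h', Bool.false_eq_true, if_false]
        exact ih seen

theorem pvDbl_pos (k : Nat) (p : Int) (hp : 0 < p) : pvDbl p k = p * 2 ^ k := by
  induction k generalizing p with
  | zero => simp [pvDbl]
  | succ k ih =>
      have hne : (p == 0) = false := by simp; omega
      simp only [pvDbl, hne, Bool.false_eq_true, ite_false]
      rw [ih (p * 2) (by omega)]
      ring

theorem pvDbl_zero (m : Nat) : pvDbl 0 m = if 0 < m then 2 ^ (m - 1) else 0 := by
  cases m with
  | zero => simp [pvDbl]
  | succ k =>
      simp only [pvDbl, Nat.add_sub_cancel]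
      rw [if_pos (Nat.succ_pos k)]
      simpa using pvDbl_pos k 1 (by omega)

-- A's match count is the same Finset cardinality (seen = ∅)
theorem pvInter_card (winners : PySem.Set String) (hw : winners.Nodup) (nums : List String) :
    (PySem.Set.inter winners (PySem.Set.ofList nums)).length
      = ((nums.filter (fun x => winners.contains x && !((PySem.Set.empty : PySem.Set String).contains x))).toFinset).card := by
  have h1 : (PySem.Set.inter winners (PySem.Set.ofList nums)).length
      = (PySem.Set.inter winners (PySem.Set.ofList nums)).toFinset.card := by
    rw [List.toFinset_card_of_nodup]
    exact List.Nodup.filter _ hw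
  rw [h1]
  congr 1
  ext x
  simp only [PySem.Set.inter, List.mem_toFinset, List.mem_filter]
  constructor
  · rintro ⟨hxw, hc⟩
    have hx : x ∈ nums := (PySem.Set.mem_ofList nums x).mp ((PySem.Set.contains_iff _ _).mp hc)
    refine ⟨hx, ?_⟩
    simp only [PySem.Set.empty, PySem.Set.contains, List.contains_nil, Bool.not_false, Bool.and_true]
    simpa using hxw
  · rintro ⟨hx, hp⟩
    rw [Bool.and_eq_true] at hp
    refine ⟨by simpa [PySem.Set.contains] using hp.1, ?_⟩
    exact (PySem.Set.contains_iff _ _).mpr ((PySem.Set.mem_ofList nums x).mpr hx)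


theorem pvLine_eq (total : Int) (line : String) : pvLineA total line = pvLineB total line := by
  unfold pvLineA pvLineB
  simp only []
  rw [pvFold_fst, pvDbl_zero, pvHits_card]
  rw [← pvInter_card (pvWinners (pvParts line)) (PySem.Set.nodup_ofList _)
      (PySem.Str.split₀ (PySem.List.pyGetD (pvParts line) 1 ""))]
  simp only [PySem.Set.len, gt_iff_lt, Int.natCast_pos]
  set m : Nat :=
    (PySem.Set.inter (pvWinners (pvParts line))
      (PySem.Set.ofList (PySem.Str.split₀ (PySem.List.pyGetD (pvParts line) 1 "")))).length with hm
  clear_value m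
  by_cases hmp : 0 < m
  · rw [if_pos hmp, if_pos hmp]
    have h1 : ((m : Int) - 1).toNat = m - 1 := by omega
    rw [h1]
  · rw [if_neg hmp, if_neg hmp]
    omega

theorem pvLineAB : pvLineA = pvLineB := funext fun t => funext fun l => pvLine_eq t l

-- ===== VERDICT (by name: the statement is the Claim_ definition above) =====
theorem solve_spec : Claim_equal_solve := by
  intro lines _ _
  unfold Spec_solve solve solve_alt
  rw [pvLineAB]
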